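-- pv_equiv track=rewrite | github.com/Cdguzmanr/Cdguzmanr-TP1-Carlos-Samuel- | TP1-Carlos-Samuel.py | procesarCodTel
-- ===== SOURCE A (Python) =====
-- def procesarCodTel(pfrase):
--     """
--     Funcionamiento: Codifica y decodifica una frase con el método de Palabra inversa
--     Entradas: pfrase(string)
--     Salidas: Resultado del proceso
--     """
--     resultado=""
--     n1,n2,n3,n4,n5,n6,n7,n8 = ["a","b","c"],["d","e","f"],["g","h","i"],["j","k","l"],["m","n","o"],["p","q","r","s"],["t","u","v"],["w","x","y","z"]
--     for n in pfrase:
--         i,m=1,0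
--         for m in range(3):
--             if n == n1[m]:
--                 resultado+= f"2{i}"
--                 break
--             if n == n2[m]:
--                 resultado+= f"3{i}"
--                 break
--             if n == n3[m]:
--                 resultado+= f"4{i}"
--                 break
--             if n == n4[m]:
--                 resultado+= f"5{i}"
--                 break
--             if n == n5[m]:
--                 resultado+= f"6{i}"
--                 break
--             if n == n6[m]:
--                 resultado+= f"7{i}"
--                 break
--             if n == n7[m]:
--                 resultado+= f"8{i}"
--                 break
--             if n == n8[m]:
--                 resultado+= f"9{i}"
--             i+=1
--         i,m=3,4
--         if n == n6[i]:
--             resultado+= f"7{i+1}"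
--         if n == n8[i]:
--             resultado+= f"9{i+1}"
--         if n == " ":
--             resultado+="*"
--         resultado+=" "
--     return f"Mensaje codificado: {resultado}"
-- ===== SOURCE B (Python) =====
-- MAPPING = {
--     'a': '21', 'b': '22', 'c': '23',
--     'd': '31', 'e': '32', 'f': '33',
--     'g': '41', 'h': '42', 'i': '43',
--     'j': '51', 'k': '52', 'l': '53',
--     'm': '61', 'n': '62', 'o': '63',
--     'p': '71', 'q': '72', 'r': '73', 's': '74',
--     't': '81', 'u': '82', 'v': '83',
--     'w': '91', 'x': '92', 'y': '93', 'z': '94',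
-- }
--
-- def procesarCodTel(pfrase):
--     resultado = "".join(MAPPING.get(n, "*" if n == " " else "") + " " for n in pfrase)
--     return "Mensaje codificado: " + resultado
-- ===== Notes on version B (the rewrite author's own statement) =====
-- stated objective: simpler
-- what changed: Replaces A's eight hand-indexed letter lists, nested inner scan with break, and post-loop patches for the fourth-position letters by one constant letter-to-code dictionary and a single join pass over the string.
import Mathlib
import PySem

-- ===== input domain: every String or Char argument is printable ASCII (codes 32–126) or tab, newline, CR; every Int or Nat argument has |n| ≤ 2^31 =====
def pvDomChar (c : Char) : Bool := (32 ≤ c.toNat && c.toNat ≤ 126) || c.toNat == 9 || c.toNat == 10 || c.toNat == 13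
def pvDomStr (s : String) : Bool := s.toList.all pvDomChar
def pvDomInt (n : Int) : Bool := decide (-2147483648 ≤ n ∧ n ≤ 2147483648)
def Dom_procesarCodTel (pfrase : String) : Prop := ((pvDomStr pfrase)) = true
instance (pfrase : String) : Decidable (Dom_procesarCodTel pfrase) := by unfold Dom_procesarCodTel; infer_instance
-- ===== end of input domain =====

-- B replaces A's eight-list nested scan and post-loop patch with one constant letter→code table and a single join pass (objective: simpler).

-- ===== PORT A =====
-- A's eight keypad letter lists
def pvN1 : List Char := ['a','b','c']
def pvN2 : List Char := ['d','e','f']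
def pvN3 : List Char := ['g','h','i']
def pvN4 : List Char := ['j','k','l']
def pvN5 : List Char := ['m','n','o']
def pvN6 : List Char := ['p','q','r','s']
def pvN7 : List Char := ['t','u','v']
def pvN8 : List Char := ['w','x','y','z']

-- A's inner 'for m in range(3)' loop with its break; the accumulator is the chars of 'resultado'
def pvInnerA (n : Char) : List Nat → Int → List Char → List Char
  | [], _, res => res
  | m :: ms, i, res =>
    if n = pvN1.getD m ' ' then res ++ ['2'] ++ (PySem.Int.toStr i).toList
    else if n = pvN2.getD m ' ' then res ++ ['3'] ++ (PySem.Int.toStr i).toList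
    else if n = pvN3.getD m ' ' then res ++ ['4'] ++ (PySem.Int.toStr i).toList
    else if n = pvN4.getD m ' ' then res ++ ['5'] ++ (PySem.Int.toStr i).toList
    else if n = pvN5.getD m ' ' then res ++ ['6'] ++ (PySem.Int.toStr i).toList
    else if n = pvN6.getD m ' ' then res ++ ['7'] ++ (PySem.Int.toStr i).toList
    else if n = pvN7.getD m ' ' then res ++ ['8'] ++ (PySem.Int.toStr i).toList
    else
      let res' := if n = pvN8.getD m ' ' then res ++ ['9'] ++ (PySem.Int.toStr i).toList else res
      pvInnerA n ms (i + 1) res'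

-- one iteration of A's outer 'for n in pfrase' loop
def pvStepA (res : List Char) (n : Char) : List Char :=
  let r1 := pvInnerA n [0, 1, 2] 1 res
  let r2 := if n = pvN6.getD 3 ' ' then r1 ++ ['7'] ++ (PySem.Int.toStr (3 + 1)).toList else r1
  let r3 := if n = pvN8.getD 3 ' ' then r2 ++ ['9'] ++ (PySem.Int.toStr (3 + 1)).toList else r2
  let r4 := if n = ' ' then r3 ++ ['*'] else r3
  r4 ++ [' ']

def procesarCodTel (pfrase : String) : String :=
  String.ofList ("Mensaje codificado: ".toList ++ pfrase.toList.foldl pvStepA [])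

-- ===== PORT B =====
-- B's constant letter→code table (the module-level MAPPING dict)
def pvMapping : PySem.Dict Char String := PySem.Dict.ofList
  [('a', "21"), ('b', "22"), ('c', "23"),
   ('d', "31"), ('e', "32"), ('f', "33"),
   ('g', "41"), ('h', "42"), ('i', "43"),
   ('j', "51"), ('k', "52"), ('l', "53"),
   ('m', "61"), ('n', "62"), ('o', "63"),
   ('p', "71"), ('q', "72"), ('r', "73"), ('s', "74"),
   ('t', "81"), ('u', "82"), ('v', "83"),
   ('w', "91"), ('x', "92"), ('y', "93"), ('z', "94")]

-- one element of B's join: MAPPING.get(n, "*" if n == " " else "") + " "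
def pvTokenB (n : Char) : List Char :=
  (pvMapping.getD n (if n = ' ' then "*" else "")).toList ++ [' ']

def procesarCodTel_alt (pfrase : String) : String :=
  String.ofList ("Mensaje codificado: ".toList ++ (pfrase.toList.map pvTokenB).flatten)

-- ===== PRECONDITION & SPEC =====
def Spec_procesarCodTel (pfrase : String) (out : String) : Prop := out = procesarCodTel_alt pfrase
instance (pfrase : String) (out : String) : Decidable (Spec_procesarCodTel pfrase out) := by unfold Spec_procesarCodTel; infer_instance

-- ===== CLAIM (what is proved, stated in full; the proofs are below) =====
def Claim_equal_procesarCodTel : Prop := ∀ (pfrase : String), Dom_procesarCodTel pfrase → Spec_procesarCodTel pfrase (procesarCodTel pfrase)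

-- ===== LEMMAS AND PROOFS =====

-- per-character agreement: one iteration of A's outer loop appends exactly B's token
theorem pvStep_eq (res : List Char) (n : Char) : pvStepA res n = res ++ pvTokenB n := by
  by_cases h_a : n = 'a'
  · subst h_a
    simp [pvStepA, pvInnerA, pvN1, pvN2, pvN3, pvN4, pvN5, pvN6, pvN7, pvN8, List.getD,
      show PySem.Int.toChars 1 = ['1'] from by decide, show PySem.Int.toChars 2 = ['2'] from by decide,
      show PySem.Int.toChars 3 = ['3'] from by decide, show PySem.Int.toChars 4 = ['4'] from by decide,
      show pvTokenB 'a' = ['2', '1', ' '] from by decide]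
  by_cases h_b : n = 'b'
  · subst h_b
    simp [pvStepA, pvInnerA, pvN1, pvN2, pvN3, pvN4, pvN5, pvN6, pvN7, pvN8, List.getD,
      show PySem.Int.toChars 1 = ['1'] from by decide, show PySem.Int.toChars 2 = ['2'] from by decide,
      show PySem.Int.toChars 3 = ['3'] from by decide, show PySem.Int.toChars 4 = ['4'] from by decide,
      show pvTokenB 'b' = ['2', '2', ' '] from by decide]
  by_cases h_c : n = 'c'
  · subst h_c
    simp [pvStepA, pvInnerA, pvN1, pvN2, pvN3, pvN4, pvN5, pvN6, pvN7, pvN8, List.getD,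
      show PySem.Int.toChars 1 = ['1'] from by decide, show PySem.Int.toChars 2 = ['2'] from by decide,
      show PySem.Int.toChars 3 = ['3'] from by decide, show PySem.Int.toChars 4 = ['4'] from by decide,
      show pvTokenB 'c' = ['2', '3', ' '] from by decide]
  by_cases h_d : n = 'd'
  · subst h_d
    simp [pvStepA, pvInnerA, pvN1, pvN2, pvN3, pvN4, pvN5, pvN6, pvN7, pvN8, List.getD,
      show PySem.Int.toChars 1 = ['1'] from by decide, show PySem.Int.toChars 2 = ['2'] from by decide,
      show PySem.Int.toChars 3 = ['3'] from by decide, show PySem.Int.toChars 4 = ['4'] from by decide,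
      show pvTokenB 'd' = ['3', '1', ' '] from by decide]
  by_cases h_e : n = 'e'
  · subst h_e
    simp [pvStepA, pvInnerA, pvN1, pvN2, pvN3, pvN4, pvN5, pvN6, pvN7, pvN8, List.getD,
      show PySem.Int.toChars 1 = ['1'] from by decide, show PySem.Int.toChars 2 = ['2'] from by decide,
      show PySem.Int.toChars 3 = ['3'] from by decide, show PySem.Int.toChars 4 = ['4'] from by decide,
      show pvTokenB 'e' = ['3', '2', ' '] from by decide]
  by_cases h_f : n = 'f'
  · subst h_f
    simp [pvStepA, pvInnerA, pvN1, pvN2, pvN3, pvN4, pvN5, pvN6, pvN7, pvN8, List.getD,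
      show PySem.Int.toChars 1 = ['1'] from by decide, show PySem.Int.toChars 2 = ['2'] from by decide,
      show PySem.Int.toChars 3 = ['3'] from by decide, show PySem.Int.toChars 4 = ['4'] from by decide,
      show pvTokenB 'f' = ['3', '3', ' '] from by decide]
  by_cases h_g : n = 'g'
  · subst h_g
    simp [pvStepA, pvInnerA, pvN1, pvN2, pvN3, pvN4, pvN5, pvN6, pvN7, pvN8, List.getD,
      show PySem.Int.toChars 1 = ['1'] from by decide, show PySem.Int.toChars 2 = ['2'] from by decide,
      show PySem.Int.toChars 3 = ['3'] from by decide, show PySem.Int.toChars 4 = ['4'] from by decide,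
      show pvTokenB 'g' = ['4', '1', ' '] from by decide]
  by_cases h_h : n = 'h'
  · subst h_h
    simp [pvStepA, pvInnerA, pvN1, pvN2, pvN3, pvN4, pvN5, pvN6, pvN7, pvN8, List.getD,
      show PySem.Int.toChars 1 = ['1'] from by decide, show PySem.Int.toChars 2 = ['2'] from by decide,
      show PySem.Int.toChars 3 = ['3'] from by decide, show PySem.Int.toChars 4 = ['4'] from by decide,
      show pvTokenB 'h' = ['4', '2', ' '] from by decide]
  by_cases h_i : n = 'i'
  · subst h_i
    simp [pvStepA, pvInnerA, pvN1, pvN2, pvN3, pvN4, pvN5, pvN6, pvN7, pvN8, List.getD,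
      show PySem.Int.toChars 1 = ['1'] from by decide, show PySem.Int.toChars 2 = ['2'] from by decide,
      show PySem.Int.toChars 3 = ['3'] from by decide, show PySem.Int.toChars 4 = ['4'] from by decide,
      show pvTokenB 'i' = ['4', '3', ' '] from by decide]
  by_cases h_j : n = 'j'
  · subst h_j
    simp [pvStepA, pvInnerA, pvN1, pvN2, pvN3, pvN4, pvN5, pvN6, pvN7, pvN8, List.getD,
      show PySem.Int.toChars 1 = ['1'] from by decide, show PySem.Int.toChars 2 = ['2'] from by decide,
      show PySem.Int.toChars 3 = ['3'] from by decide, show PySem.Int.toChars 4 = ['4'] from by decide,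
      show pvTokenB 'j' = ['5', '1', ' '] from by decide]
  by_cases h_k : n = 'k'
  · subst h_k
    simp [pvStepA, pvInnerA, pvN1, pvN2, pvN3, pvN4, pvN5, pvN6, pvN7, pvN8, List.getD,
      show PySem.Int.toChars 1 = ['1'] from by decide, show PySem.Int.toChars 2 = ['2'] from by decide,
      show PySem.Int.toChars 3 = ['3'] from by decide, show PySem.Int.toChars 4 = ['4'] from by decide,
      show pvTokenB 'k' = ['5', '2', ' '] from by decide]
  by_cases h_l : n = 'l'
  · subst h_l
    simp [pvStepA, pvInnerA, pvN1, pvN2, pvN3, pvN4, pvN5, pvN6, pvN7, pvN8, List.getD,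
      show PySem.Int.toChars 1 = ['1'] from by decide, show PySem.Int.toChars 2 = ['2'] from by decide,
      show PySem.Int.toChars 3 = ['3'] from by decide, show PySem.Int.toChars 4 = ['4'] from by decide,
      show pvTokenB 'l' = ['5', '3', ' '] from by decide]
  by_cases h_m : n = 'm'
  · subst h_m
    simp [pvStepA, pvInnerA, pvN1, pvN2, pvN3, pvN4, pvN5, pvN6, pvN7, pvN8, List.getD,
      show PySem.Int.toChars 1 = ['1'] from by decide, show PySem.Int.toChars 2 = ['2'] from by decide,
      show PySem.Int.toChars 3 = ['3'] from by decide, show PySem.Int.toChars 4 = ['4'] from by decide,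
      show pvTokenB 'm' = ['6', '1', ' '] from by decide]
  by_cases h_n : n = 'n'
  · subst h_n
    simp [pvStepA, pvInnerA, pvN1, pvN2, pvN3, pvN4, pvN5, pvN6, pvN7, pvN8, List.getD,
      show PySem.Int.toChars 1 = ['1'] from by decide, show PySem.Int.toChars 2 = ['2'] from by decide,
      show PySem.Int.toChars 3 = ['3'] from by decide, show PySem.Int.toChars 4 = ['4'] from by decide,
      show pvTokenB 'n' = ['6', '2', ' '] from by decide]
  by_cases h_o : n = 'o'
  · subst h_o
    simp [pvStepA, pvInnerA, pvN1, pvN2, pvN3, pvN4, pvN5, pvN6, pvN7, pvN8, List.getD,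
      show PySem.Int.toChars 1 = ['1'] from by decide, show PySem.Int.toChars 2 = ['2'] from by decide,
      show PySem.Int.toChars 3 = ['3'] from by decide, show PySem.Int.toChars 4 = ['4'] from by decide,
      show pvTokenB 'o' = ['6', '3', ' '] from by decide]
  by_cases h_p : n = 'p'
  · subst h_p
    simp [pvStepA, pvInnerA, pvN1, pvN2, pvN3, pvN4, pvN5, pvN6, pvN7, pvN8, List.getD,
      show PySem.Int.toChars 1 = ['1'] from by decide, show PySem.Int.toChars 2 = ['2'] from by decide,
      show PySem.Int.toChars 3 = ['3'] from by decide, show PySem.Int.toChars 4 = ['4'] from by decide,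
      show pvTokenB 'p' = ['7', '1', ' '] from by decide]
  by_cases h_q : n = 'q'
  · subst h_q
    simp [pvStepA, pvInnerA, pvN1, pvN2, pvN3, pvN4, pvN5, pvN6, pvN7, pvN8, List.getD,
      show PySem.Int.toChars 1 = ['1'] from by decide, show PySem.Int.toChars 2 = ['2'] from by decide,
      show PySem.Int.toChars 3 = ['3'] from by decide, show PySem.Int.toChars 4 = ['4'] from by decide,
      show pvTokenB 'q' = ['7', '2', ' '] from by decide]
  by_cases h_r : n = 'r'
  · subst h_r
    simp [pvStepA, pvInnerA, pvN1, pvN2, pvN3, pvN4, pvN5, pvN6, pvN7, pvN8, List.getD,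
      show PySem.Int.toChars 1 = ['1'] from by decide, show PySem.Int.toChars 2 = ['2'] from by decide,
      show PySem.Int.toChars 3 = ['3'] from by decide, show PySem.Int.toChars 4 = ['4'] from by decide,
      show pvTokenB 'r' = ['7', '3', ' '] from by decide]
  by_cases h_s : n = 's'
  · subst h_s
    simp [pvStepA, pvInnerA, pvN1, pvN2, pvN3, pvN4, pvN5, pvN6, pvN7, pvN8, List.getD,
      show PySem.Int.toChars 1 = ['1'] from by decide, show PySem.Int.toChars 2 = ['2'] from by decide,
      show PySem.Int.toChars 3 = ['3'] from by decide, show PySem.Int.toChars 4 = ['4'] from by decide,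
      show pvTokenB 's' = ['7', '4', ' '] from by decide]
  by_cases h_t : n = 't'
  · subst h_t
    simp [pvStepA, pvInnerA, pvN1, pvN2, pvN3, pvN4, pvN5, pvN6, pvN7, pvN8, List.getD,
      show PySem.Int.toChars 1 = ['1'] from by decide, show PySem.Int.toChars 2 = ['2'] from by decide,
      show PySem.Int.toChars 3 = ['3'] from by decide, show PySem.Int.toChars 4 = ['4'] from by decide,
      show pvTokenB 't' = ['8', '1', ' '] from by decide]
  by_cases h_u : n = 'u'
  · subst h_u
    simp [pvStepA, pvInnerA, pvN1, pvN2, pvN3, pvN4, pvN5, pvN6, pvN7, pvN8, List.getD,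
      show PySem.Int.toChars 1 = ['1'] from by decide, show PySem.Int.toChars 2 = ['2'] from by decide,
      show PySem.Int.toChars 3 = ['3'] from by decide, show PySem.Int.toChars 4 = ['4'] from by decide,
      show pvTokenB 'u' = ['8', '2', ' '] from by decide]
  by_cases h_v : n = 'v'
  · subst h_v
    simp [pvStepA, pvInnerA, pvN1, pvN2, pvN3, pvN4, pvN5, pvN6, pvN7, pvN8, List.getD,
      show PySem.Int.toChars 1 = ['1'] from by decide, show PySem.Int.toChars 2 = ['2'] from by decide,
      show PySem.Int.toChars 3 = ['3'] from by decide, show PySem.Int.toChars 4 = ['4'] from by decide,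
      show pvTokenB 'v' = ['8', '3', ' '] from by decide]
  by_cases h_w : n = 'w'
  · subst h_w
    simp [pvStepA, pvInnerA, pvN1, pvN2, pvN3, pvN4, pvN5, pvN6, pvN7, pvN8, List.getD,
      show PySem.Int.toChars 1 = ['1'] from by decide, show PySem.Int.toChars 2 = ['2'] from by decide,
      show PySem.Int.toChars 3 = ['3'] from by decide, show PySem.Int.toChars 4 = ['4'] from by decide,
      show pvTokenB 'w' = ['9', '1', ' '] from by decide]
  by_cases h_x : n = 'x'
  · subst h_x
    simp [pvStepA, pvInnerA, pvN1, pvN2, pvN3, pvN4, pvN5, pvN6, pvN7, pvN8, List.getD,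
      show PySem.Int.toChars 1 = ['1'] from by decide, show PySem.Int.toChars 2 = ['2'] from by decide,
      show PySem.Int.toChars 3 = ['3'] from by decide, show PySem.Int.toChars 4 = ['4'] from by decide,
      show pvTokenB 'x' = ['9', '2', ' '] from by decide]
  by_cases h_y : n = 'y'
  · subst h_y
    simp [pvStepA, pvInnerA, pvN1, pvN2, pvN3, pvN4, pvN5, pvN6, pvN7, pvN8, List.getD,
      show PySem.Int.toChars 1 = ['1'] from by decide, show PySem.Int.toChars 2 = ['2'] from by decide,
      show PySem.Int.toChars 3 = ['3'] from by decide, show PySem.Int.toChars 4 = ['4'] from by decide,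
      show pvTokenB 'y' = ['9', '3', ' '] from by decide]
  by_cases h_z : n = 'z'
  · subst h_z
    simp [pvStepA, pvInnerA, pvN1, pvN2, pvN3, pvN4, pvN5, pvN6, pvN7, pvN8, List.getD,
      show PySem.Int.toChars 1 = ['1'] from by decide, show PySem.Int.toChars 2 = ['2'] from by decide,
      show PySem.Int.toChars 3 = ['3'] from by decide, show PySem.Int.toChars 4 = ['4'] from by decide,
      show pvTokenB 'z' = ['9', '4', ' '] from by decide]
  by_cases hsp : n = ' '
  · subst hsp
    simp [pvStepA, pvInnerA, pvN1, pvN2, pvN3, pvN4, pvN5, pvN6, pvN7, pvN8, List.getD,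
      show PySem.Int.toChars 1 = ['1'] from by decide, show PySem.Int.toChars 2 = ['2'] from by decide,
      show PySem.Int.toChars 3 = ['3'] from by decide, show PySem.Int.toChars 4 = ['4'] from by decide,
      show pvTokenB ' ' = ['*', ' '] from by decide]
  have htok : pvTokenB n = [' '] := by
    simp [pvTokenB, pvMapping, PySem.Dict.ofList, PySem.Dict.getD, PySem.Dict.get?, PySem.Dict.update,
      PySem.Dict.empty, PySem.Dict.insert, Ne.symm h_a, Ne.symm h_b, Ne.symm h_c, Ne.symm h_d, Ne.symm h_e, Ne.symm h_f, Ne.symm h_g, Ne.symm h_h, Ne.symm h_i, Ne.symm h_j, Ne.symm h_k, Ne.symm h_l, Ne.symm h_m, Ne.symm h_n, Ne.symm h_o, Ne.symm h_p, Ne.symm h_q, Ne.symm h_r, Ne.symm h_s, Ne.symm h_t, Ne.symm h_u, Ne.symm h_v, Ne.symm h_w, Ne.symm h_x, Ne.symm h_y, Ne.symm h_z, h_a, h_b, h_c, h_d, h_e, h_f, h_g, h_h, h_i, h_j, h_k, h_l, h_m, h_n, h_o, h_p, h_q, h_r, h_s, h_t, h_u, h_v, h_w, h_x, h_y, h_z,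 hsp]
  simp [pvStepA, pvInnerA, pvN1, pvN2, pvN3, pvN4, pvN5, pvN6, pvN7, pvN8, List.getD,
      show PySem.Int.toChars 1 = ['1'] from by decide, show PySem.Int.toChars 2 = ['2'] from by decide,
      show PySem.Int.toChars 3 = ['3'] from by decide, show PySem.Int.toChars 4 = ['4'] from by decide, htok, h_a, h_b, h_c, h_d, h_e, h_f, h_g, h_h, h_i, h_j, h_k, h_l, h_m, h_n, h_o, h_p, h_q, h_r, h_s, h_t, h_u, h_v, h_w, h_x, h_y, h_z, hsp]


theorem procesarCodTel_spec : Claim_equal_procesarCodTel := by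
  intro pfrase _
  unfold Spec_procesarCodTel procesarCodTel procesarCodTel_alt
  have hfun : pvStepA = fun res n => res ++ pvTokenB n := funext fun res => funext fun n => pvStep_eq res n
  rw [hfun, PySem.List.foldl_append_eq_flatMap, List.flatMap_def]
  simp
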